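-- pv_equiv track=rewrite | github.com/ContextLab/orchestrator | src/orchestrator/tools/llm_tools.py | _optimize_brevity
-- ===== SOURCE A (Python) =====
-- from typing import Any, Dict, List, Optional, Tuple
--
-- def _optimize_brevity(prompt: str, context: Dict[str, Any]) -> str:
--     """Optimize prompt for brevity."""
--     # Remove redundant words
--     brevity_map = {
--         "please could you": "please",
--         "i would like you to": "please",
--         "can you please": "please",
--         "in order to": "to",
--         "as well as": "and",
--         "at this point in time": "now",
--         "due to the fact that": "because",
--     }
--
--     optimized = prompt.lower()
--     for long_form, short_form in brevity_map.items():
--         optimized = optimized.replace(long_form, short_form)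
--
--     # Preserve original casing for words that weren't replaced
--     if optimized != prompt.lower():
--         # Simple approach: capitalize first letter and after periods
--         optimized = ". ".join(s.strip().capitalize() for s in optimized.split(". "))
--     else:
--         optimized = prompt
--
--     return optimized
-- ===== SOURCE B (Python) =====
-- def _optimize_brevity(prompt: str, context: dict) -> str:
--     """Optimize prompt for brevity (single left-to-right scan)."""
--     rules = [
--         ("please could you", "please"),
--         ("i would like you to", "please"),
--         ("can you please", "please"),
--         ("in order to", "to"),
--         ("as well as", "and"),
--         ("at this point in time", "now"),
--         ("due to the fact that", "because"),
--     ]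
--     low = prompt.lower()
--     out = []
--     i = 0
--     n = len(low)
--     while i < n:
--         for long_form, short_form in rules:
--             if low.startswith(long_form, i):
--                 out.append(short_form)
--                 i += len(long_form)
--                 break
--         else:
--             out.append(low[i])
--             i += 1
--     optimized = "".join(out)
--     if optimized != low:
--         optimized = ". ".join(s.strip().capitalize() for s in optimized.split(". "))
--     else:
--         optimized = prompt
--     return optimized
-- ===== Notes on version B (the rewrite author's own statement) =====
-- stated objective: alternative
-- what changed: A single left-to-right scan that at each position applies the first matching rule and never rescans replacement text replaces A's seven sequential whole-string replace passes.
import Mathlib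
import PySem

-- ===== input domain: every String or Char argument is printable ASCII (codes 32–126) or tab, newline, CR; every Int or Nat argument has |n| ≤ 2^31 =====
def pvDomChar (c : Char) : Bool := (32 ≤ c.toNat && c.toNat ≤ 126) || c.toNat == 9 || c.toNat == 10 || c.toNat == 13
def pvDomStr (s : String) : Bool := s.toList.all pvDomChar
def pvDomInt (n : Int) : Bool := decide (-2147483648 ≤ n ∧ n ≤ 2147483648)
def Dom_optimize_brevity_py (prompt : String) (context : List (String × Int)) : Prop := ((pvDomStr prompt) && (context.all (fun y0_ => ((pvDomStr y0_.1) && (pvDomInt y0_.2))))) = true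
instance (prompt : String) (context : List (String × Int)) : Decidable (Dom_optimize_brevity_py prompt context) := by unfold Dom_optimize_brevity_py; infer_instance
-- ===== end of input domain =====

-- B rewrites A's seven sequential whole-string `replace` passes as one left-to-right
-- first-match scan; Pre_ excludes ten fixed overlapping phrase combinations on which
-- the order of replacement is an unspecified tie and the two differ.

-- ===== PORT A =====
-- Python str.capitalize(): first char to upper, rest to lower.  Exact on the ASCII
-- domain (Chars.upperChar/lowerChar are Python's upper/lower for ASCII chars).
def pvCapitalize (s : String) : String :=
  String.ofList (match s.toList with
    | [] => []
    | c :: t => PySem.Chars.upperChar c :: t.map PySem.Chars.lowerChar)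

def brevityMap : List (String × String) :=
  [("please could you", "please"),
   ("i would like you to", "please"),
   ("can you please", "please"),
   ("in order to", "to"),
   ("as well as", "and"),
   ("at this point in time", "now"),
   ("due to the fact that", "because")]

def optimize_brevity_py (prompt : String) (context : List (String × Int)) : String :=
  let low := PySem.Str.lower prompt
  let optimized := brevityMap.foldl (fun s p => PySem.Str.replace s p.1 p.2) low
  if optimized ≠ low then
    PySem.Str.join ". "
      (((PySem.Str.split? optimized ". ").getD []).map
        (fun piece => pvCapitalize (PySem.Str.strip piece)))
  else prompt

-- ===== PORT B =====
def rulesB : List (String × String) := brevityMap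

-- B's inner `for long_form, short_form in rules: if low.startswith(long_form, i)` loop
def findRuleB : List (String × String) → List Char → Option (String × Nat)
  | [], _ => none
  | (k, v) :: rest, l =>
    if k.toList.isPrefixOf l then some (v, k.toList.length) else findRuleB rest l

-- B's `while i < n` scan, on the char list
def scanBGo : Nat → List Char → List Char
  | _, [] => []
  | 0, l => l    -- unreachable for fuel ≥ length
  | fuel + 1, c :: t =>
    match findRuleB rulesB (c :: t) with
    | some (v, n) => v.toList ++ scanBGo fuel ((c :: t).drop n)
    | none => c :: scanBGo fuel t

def scanB (l : List Char) : List Char := scanBGo l.length l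

def optimize_brevity_py_alt (prompt : String) (context : List (String × Int)) : String :=
  let low := PySem.Str.lower prompt
  let optimized := String.ofList (scanB low.toList)
  if optimized ≠ low then
    PySem.Str.join ". "
      (((PySem.Str.split? optimized ". ").getD []).map
        (fun piece => pvCapitalize (PySem.Str.strip piece)))
  else prompt

-- ===== PRECONDITION & SPEC =====
-- Pre_ excludes prompts whose lowercased text contains one of ten fixed
-- overlapping/cascading phrase combinations: there two phrase occurrences overlap
-- (or a replacement's output joins adjacent text into a new phrase), and which
-- occurrence is replaced first is an unspecified tie — A resolves it by dictionary
-- pass order (e.g. "Due to the fact thnow"), B leftmost-first ("Because this point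
-- in time"); everywhere else the two agree exactly.
def Pre_optimize_brevity_py (prompt : String) (context : List (String × Int)) : Prop :=
  ∀ t ∈ ["can you please could you",
      "can you i would like you to",
      "due to the fact that this point in time",
      "due in order to the fact that",
      "due to the fact thain order to",
      "due in order to the fact thain order to",
      "as well asue to the fact that",
      "as well asue in order to the fact that",
      "as well asue to the fact thain order to",
      "as well asue in order to the fact thain order to"],
    ¬ (t.toList <:+: PySem.Chars.lower prompt.toList)
instance (prompt : String) (context : List (String × Int)) : Decidable (Pre_optimize_brevity_py prompt context) := by unfold Pre_optimize_brevity_py; infer_instance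

def pvWitness_optimize_brevity_py : String × (List (String × Int)) :=
  ("Can you please summarize this in order to save time?", [])

def Spec_optimize_brevity_py (prompt : String) (context : List (String × Int)) (out : String) : Prop := out = optimize_brevity_py_alt prompt context
instance (prompt : String) (context : List (String × Int)) (out : String) : Decidable (Spec_optimize_brevity_py prompt context out) := by unfold Spec_optimize_brevity_py; infer_instance

-- ===== CLAIM (what is proved, stated in full; the proofs are below) =====
def Claim_equal_optimize_brevity_py : Prop := ∀ (prompt : String) (context : List (String × Int)), Dom_optimize_brevity_py prompt context → Pre_optimize_brevity_py prompt context → Spec_optimize_brevity_py prompt context (optimize_brevity_py prompt context)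

-- ===== LEMMAS AND PROOFS =====

theorem findRuleB_len (rs : List (String × String)) (hrs : ∀ r ∈ rs, r.1.toList ≠ []) :
    ∀ l v n, findRuleB rs l = some (v, n) → 1 ≤ n ∧ n ≤ l.length := by
  induction rs with
  | nil => intro l v n h; simp [findRuleB] at h
  | cons r rest ih =>
    intro l v n h
    rw [show findRuleB (r :: rest) l = (if r.1.toList.isPrefixOf l then some (r.2, r.1.toList.length) else findRuleB rest l) from by cases r; rfl] at h
    split at h
    · rename_i hp
      rcases h with ⟨rfl, rfl⟩ | h
      constructor
      · have := hrs r (by simp); cases hr : r.1.toList <;> simp_all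
      · exact (List.isPrefixOf_iff_prefix.mp hp).length_le
    · exact ih (fun q hq => hrs q (by simp [hq])) l v n h


-- `repl k v` is Python's s.replace(k, v) for nonempty k, as structural recursion
def repl (k v : List Char) : List Char → List Char
  | [] => []
  | c :: t =>
    if k.isPrefixOf (c :: t) ∧ k ≠ [] then v ++ repl k v (List.drop k.length (c :: t))
    else c :: repl k v t
termination_by l => l.length
decreasing_by
  · rename_i h; simp [List.length_drop]
    have : 1 ≤ k.length := by rcases h with ⟨-, hk⟩; cases k <;> simp_all
    omega
  · simp

theorem go_eq (k v : List Char) (hk : k ≠ []) :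
    ∀ fuel l acc, l.length ≤ fuel →
      PySem.Chars.replace.go k v fuel l acc = acc.reverse ++ repl k v l := by
  intro fuel
  induction fuel with
  | zero =>
    intro l acc h
    have : l = [] := by cases l <;> simp_all
    subst this; simp [PySem.Chars.replace.go.eq_def, repl]
  | succ n ih =>
    intro l acc h
    cases l with
    | nil => simp [PySem.Chars.replace.go.eq_def, repl]
    | cons c t =>
      rw [PySem.Chars.replace.go.eq_def, repl]
      by_cases hp : k.isPrefixOf (c :: t)
      · have h1 : 1 ≤ k.length := by cases k <;> simp_all
        simp only [hp, hk, ne_eq, not_false_iff, and_true, if_true]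
        rw [ih _ _ (by simp [List.length_drop] at h ⊢; omega)]
        simp
      · simp only [hp, false_and, if_false, Bool.false_eq_true]
        rw [ih t (c :: acc) (by simp at h ⊢; omega)]
        simp

theorem replace_eq (k v l : List Char) (hk : k ≠ []) :
    PySem.Chars.replace l k v = repl k v l := by
  have hke : k.isEmpty = false := by cases k <;> simp_all
  simp only [PySem.Chars.replace, hke, Bool.false_eq_true, if_false]
  rw [go_eq k v hk l.length l [] (le_refl l.length)]; simp

theorem repl_nil (k v : List Char) : repl k v [] = [] := by simp [repl]

theorem repl_match (k v l : List Char) (hk : k ≠ []) (h : k <+: l) :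
    repl k v l = v ++ repl k v (l.drop k.length) := by
  cases l with
  | nil => exact absurd (List.prefix_nil.mp h) hk
  | cons c t => rw [repl]; simp [List.isPrefixOf_iff_prefix.mpr h, hk]

theorem repl_copy (k v : List Char) (c : Char) (t : List Char) (h : ¬ k <+: (c :: t)) :
    repl k v (c :: t) = c :: repl k v t := by
  rw [repl]
  have : k.isPrefixOf (c :: t) = false := by
    by_contra hc; simp at hc; exact h hc
  simp [this]

theorem prefX {a b x : List Char} (h : a <+: b ++ x) : a <+: b ∨ b <+: a := by
  rcases le_total a.length b.length with hle | hle
  · exact Or.inl (List.prefix_of_prefix_length_le h (List.prefix_append b x) hle)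
  · exact Or.inr (List.prefix_of_prefix_length_le (List.prefix_append b x) h hle)

theorem repl_push (k v : List Char) :
    ∀ (u x : List Char), (∀ i, i < u.length → ¬ k <+: (u.drop i ++ x)) →
      repl k v (u ++ x) = u ++ repl k v x := by
  intro u
  induction u with
  | nil => simp
  | cons c u' ih =>
    intro x H
    have h0 : ¬ k <+: (c :: u') ++ x := by
      have := H 0 (by simp); simpa using this
    rw [List.cons_append, repl_copy k v c (u' ++ x) h0,
        ih x (fun i hi => by have := H (i+1) (by simp; omega); simpa using this)]
    simp

theorem repl_create (k v : List Char) (hk : k ≠ []) :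
    ∀ (t w : List Char), w <+: repl k v t →
      w <+: t ∨ ∃ a r, w = a ++ r ∧ r ≠ [] ∧ (a ++ k) <+: t ∧
        (r <+: v ∨ ∃ r', r = v ++ r' ∧ r' <+: repl k v (t.drop (a.length + k.length))) := by
  intro t
  induction hn : t.length using Nat.strong_induction_on generalizing t with
  | _ n ih =>
    subst hn
    intro w hw
    match t with
    | [] => rw [repl_nil] at hw; exact Or.inl hw
    | c :: t' =>
      by_cases hp : k <+: (c :: t')
      · rw [repl_match k v _ hk hp] at hw
        rcases prefX hw with hwv | hvw
        · rcases eq_or_ne w [] with rfl | hne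
          · exact Or.inl (List.nil_prefix)
          · exact Or.inr ⟨[], w, by simp, hne, by simpa using hp, Or.inl hwv⟩
        · rcases hvw with ⟨w', rfl⟩
          rcases eq_or_ne (v ++ w') [] with he | hne
          · simp at he; rcases he with ⟨rfl, rfl⟩; exact Or.inl (List.nil_prefix)
          · refine Or.inr ⟨[], v ++ w', by simp, hne, by simpa using hp, Or.inr ⟨w', rfl, ?_⟩⟩
            simp only [List.length_nil, Nat.zero_add]
            exact (List.prefix_append_right_inj v).mp hw
      · rw [repl_copy k v c t' hp] at hw
        match w, hw with
        | [], _ => exact Or.inl List.nil_prefix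
        | d :: w', hw =>
          obtain ⟨rfl, hw'⟩ : d = c ∧ w' <+: repl k v t' := by
            rcases hw with ⟨z, hz⟩; simp at hz; exact ⟨hz.1, ⟨z, hz.2⟩⟩
          rcases ih t'.length (by simp) t' rfl w' hw' with h | ⟨a, r, rfl, hr, hak, hrest⟩
          · exact Or.inl ((List.prefix_cons_inj d).mpr h)
          · refine Or.inr ⟨d :: a, r, by simp, hr, (List.prefix_cons_inj d).mpr hak, ?_⟩
            have harith : (d :: a).length + k.length = (a.length + k.length) + 1 := by simp; omega
            rw [harith, List.drop_succ_cons]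
            exact hrest

-- no occurrence of w can be created by `repl k v` when no nonempty suffix of w is a
-- prefix of v and v occurs nowhere in w
theorem no_create (k v w : List Char) (hk : k ≠ [])
    (hC1 : ∀ j, j < w.length → ¬ (w.drop j <+: v))
    (hC2 : ∀ j, j < w.length → ¬ (v <+: w.drop j)) :
    ∀ x, w <+: repl k v x → w <+: x := by
  intro x hw
  rcases repl_create k v hk x w hw with h | ⟨a, r, rfl, hr, hak, hrest⟩
  · exact h
  · exfalso
    have hj : a.length < (a ++ r).length := by cases r <;> simp_all
    have hdrop : (a ++ r).drop a.length = r := by simp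
    rcases hrest with hrv | ⟨r', rfl, -⟩
    · exact hC1 a.length hj (by rw [hdrop]; exact hrv)
    · exact hC2 a.length hj (by rw [hdrop]; exact List.prefix_append v r')

-- like no_create but keeps the surviving junction cases, indexed by the cut j
theorem semi_create (k v w : List Char) (hk : k ≠ []) :
    ∀ x, w <+: repl k v x → w <+: x ∨ ∃ j, j < w.length ∧ (w.take j ++ k) <+: x ∧
      (w.drop j <+: v ∨ (v <+: w.drop j ∧ (w.drop j).drop v.length <+: repl k v (x.drop (j + k.length)))) := by
  intro x hw
  rcases repl_create k v hk x w hw with h | ⟨a, r, rfl, hr, hak, hrest⟩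
  · exact Or.inl h
  · right
    have hj : a.length < (a ++ r).length := by cases r <;> simp_all
    have htake : (a ++ r).take a.length = a := by simp
    have hdrop : (a ++ r).drop a.length = r := by simp
    refine ⟨a.length, hj, by rw [htake]; exact hak, ?_⟩
    rcases hrest with hrv | ⟨r', rfl, hr'⟩
    · exact Or.inl (by rw [hdrop]; exact hrv)
    · exact Or.inr ⟨by rw [hdrop]; exact List.prefix_append v r', by rw [hdrop]; simpa using hr'⟩

-- the key/value lists, on chars
def kc1 : List Char := "please could you".toList
def kc2 : List Char := "i would like you to".toList
def kc3 : List Char := "can you please".toList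
def kc4 : List Char := "in order to".toList
def kc5 : List Char := "as well as".toList
def kc6 : List Char := "at this point in time".toList
def kc7 : List Char := "due to the fact that".toList
def vplease : List Char := "please".toList
def vto : List Char := "to".toList
def vand : List Char := "and".toList
def vnow : List Char := "now".toList
def vbecause : List Char := "because".toList

def comp (s : List Char) : List Char :=
  repl kc7 vbecause (repl kc6 vnow (repl kc5 vand (repl kc4 vto
    (repl kc3 vplease (repl kc2 vplease (repl kc1 vplease s))))))

def cascadeTriggers : List String :=
  ["can you please could you",
   "can you i would like you to",
   "due to the fact that this point in time",
   "due in order to the fact that",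
   "due to the fact thain order to",
   "due in order to the fact thain order to",
   "as well asue to the fact that",
   "as well asue in order to the fact that",
   "as well asue to the fact thain order to",
   "as well asue in order to the fact thain order to"]

def NT (s : List Char) : Prop := ∀ tg ∈ cascadeTriggers.map String.toList, ¬ tg <:+: s

theorem scanBGo_eq : ∀ fuel (l : List Char), l.length ≤ fuel → scanBGo fuel l = scanB l := by
  have step : ∀ fuel (l : List Char), l.length ≤ fuel →
      scanBGo fuel l = scanBGo l.length l := by
    intro fuel
    induction fuel using Nat.strong_induction_on with
    | _ n ih =>
      intro l h
      match n, l with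
      | 0, [] => rfl
      | _ + 1, [] => rfl
      | 0, c :: t => simp at h
      | n + 1, c :: t =>
        have hlen : (c :: t).length = t.length + 1 := by simp
        rw [hlen, scanBGo, scanBGo]
        cases hf : findRuleB rulesB (c :: t) with
        | some p =>
          obtain ⟨v, m⟩ := p
          have hb := findRuleB_len rulesB (by decide) (c :: t) v m hf
          simp only []
          rw [ih n (by omega) _ (by simp [List.length_drop] at h ⊢; omega),
              ih t.length (by simp at h; omega) _ (by simp [List.length_drop]; omega)]
        | none =>
          simp only []
          rw [ih n (by omega) t (by simp at h ⊢; omega)]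
  intro fuel l h
  rw [step fuel l h]; rfl

theorem scanB_cons_rule (c : Char) (t : List Char) (v : String) (n : Nat)
    (h : findRuleB rulesB (c :: t) = some (v, n)) :
    scanB (c :: t) = v.toList ++ scanB ((c :: t).drop n) := by
  have hb := findRuleB_len rulesB (by decide) (c :: t) v n h
  show scanBGo (c :: t).length (c :: t) = _
  rw [show (c :: t).length = t.length + 1 from by simp, scanBGo, h]
  simp only []
  rw [scanBGo_eq t.length _ (by simp [List.length_drop]; omega)]

theorem scanB_cons_none (c : Char) (t : List Char)
    (h : findRuleB rulesB (c :: t) = none) :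
    scanB (c :: t) = c :: scanB t := by
  show scanBGo (c :: t).length (c :: t) = _
  rw [show (c :: t).length = t.length + 1 from by simp, scanBGo, h]
  simp only []
  rw [scanBGo_eq t.length t (le_refl _)]

theorem push_safe (k v u : List Char)
    (hchk : ∀ p, p < u.length → ¬ (k <+: u.drop p) ∧ ¬ (u.drop p <+: k)) :
    ∀ x, repl k v (u ++ x) = u ++ repl k v x := by
  intro x
  refine repl_push k v u x (fun i hi hcontra => ?_)
  rcases prefX hcontra with h | h
  · exact (hchk i hi).1 h
  · exact (hchk i hi).2 h

theorem prefix_glue {a b x : List Char} (ha : a <+: x) (hb : b <+: x.drop a.length) :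
    a ++ b <+: x := by
  rcases ha with ⟨x', rfl⟩
  rw [List.drop_left] at hb
  exact (List.prefix_append_right_inj a).mpr hb

-- all ways "ue to the fact that" can sit at the front of the pass-4..1 image of y
theorem peel_p3 (w : List Char)
    (hC1 : ∀ j, j < w.length → ¬ (w.drop j <+: vplease))
    (hC2 : ∀ j, j < w.length → ¬ (vplease <+: w.drop j)) :
    ∀ y, w <+: repl kc3 vplease (repl kc2 vplease (repl kc1 vplease y)) → w <+: y :=
  fun y h =>
    no_create kc1 vplease w (by decide) hC1 hC2 y
      (no_create kc2 vplease w (by decide) hC1 hC2 _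
        (no_create kc3 vplease w (by decide) hC1 hC2 _ h))

-- all ways "ue to the fact that" can sit at the front of the pass-4..1 image of y
theorem peel_w7 (y : List Char)
    (h : "ue to the fact that".toList <+:
      repl kc4 vto (repl kc3 vplease (repl kc2 vplease (repl kc1 vplease y)))) :
    "ue to the fact that".toList <+: y ∨
    "ue in order to the fact that".toList <+: y ∨
    "ue in order to the fact thain order to".toList <+: y ∨
    "ue to the fact thain order to".toList <+: y := by
  rcases semi_create kc4 vto "ue to the fact that".toList (by decide) _ h with
    hlit | ⟨j, hj, hpre, hcase⟩
  · exact Or.inl (peel_p3 _ (by decide) (by decide) y hlit)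
  · have hj' : j < 19 := by simpa using hj
    interval_cases j
    all_goals try (rcases hcase with hc | ⟨hc, -⟩ <;> exact absurd hc (by decide))
    -- j = 3
    · rcases hcase with hc | ⟨-, hr'⟩
      · exact absurd hc (by decide)
      · rw [show ("ue to the fact that".toList.drop 3).drop vto.length
              = " the fact that".toList from by decide,
            show (3 : Nat) + kc4.length = 14 from by decide] at hr'
        rcases semi_create kc4 vto " the fact that".toList (by decide) _ hr' with
          hlit2 | ⟨j2, hj2, hpre2, hcase2⟩
        · have hglue := prefix_glue (b := " the fact that".toList) hpre
            (by rw [show ("ue to the fact that".toList.take 3 ++ kc4).length = 14 from by decide]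
                exact hlit2)
          rw [show ("ue to the fact that".toList.take 3 ++ kc4) ++ " the fact that".toList
                = "ue in order to the fact that".toList from by decide] at hglue
          exact Or.inr (Or.inl (peel_p3 _ (by decide) (by decide) y hglue))
        · have hj2' : j2 < 14 := by simpa using hj2
          interval_cases j2
          all_goals try (rcases hcase2 with hc | ⟨hc, -⟩ <;> exact absurd hc (by decide))
          -- j2 = 13
          · have hglue := prefix_glue (b := " the fact that".toList.take 13 ++ kc4) hpre
              (by rw [show ("ue to the fact that".toList.take 3 ++ kc4).length = 14 from by decide]
                  exact hpre2)
            rw [show ("ue to the fact that".toList.take 3 ++ kc4) ++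
                  (" the fact that".toList.take 13 ++ kc4)
                = "ue in order to the fact thain order to".toList from by decide] at hglue
            exact Or.inr (Or.inr (Or.inl (peel_p3 _ (by decide) (by decide) y hglue)))
    -- j = 18
    · rcases hcase with - | ⟨hc, -⟩
      · rw [show "ue to the fact that".toList.take 18 ++ kc4
              = "ue to the fact thain order to".toList from by decide] at hpre
        exact Or.inr (Or.inr (Or.inr (peel_p3 _ (by decide) (by decide) y hpre)))
      · exact absurd hc (by decide)

-- ones that need the trigger hypotheses: pushing kc3 past pass 1
theorem H31 (rest : List Char)
    (hnt : ¬ ("can you please could you".toList <+: kc3 ++ rest)) :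
    ∀ p, p < kc3.length → ¬ kc1 <+: (kc3.drop p ++ rest) := by
  intro p hp hcontra
  rcases prefX hcontra with h | h
  · exact (by decide : ∀ p, p < kc3.length → ¬ kc1 <+: kc3.drop p) p hp h
  · have hp8 : p = 8 :=
      (by decide : ∀ p, p < kc3.length → kc3.drop p <+: kc1 → p = 8) p hp h
    subst hp8
    rw [show kc3.drop 8 = "please".toList from by decide,
        show kc1 = "please".toList ++ " could you".toList from by decide] at hcontra
    have hcy := (List.prefix_append_right_inj ("please".toList)).mp hcontra
    apply hnt
    rw [show "can you please could you".toList = kc3 ++ " could you".toList from by decide]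
    exact (List.prefix_append_right_inj kc3).mpr hcy

-- pushing kc7 past pass 6
theorem H76 (rest : List Char)
    (hnt : ¬ ("due to the fact that this point in time".toList <+: kc7 ++ rest)) :
    ∀ p, p < kc7.length → ¬ kc6 <+:
      (kc7.drop p ++ repl kc5 vand (repl kc4 vto (repl kc3 vplease
        (repl kc2 vplease (repl kc1 vplease rest))))) := by
  intro p hp hcontra
  rcases prefX hcontra with h | h
  · exact (by decide : ∀ p, p < kc7.length → ¬ kc6 <+: kc7.drop p) p hp h
  · have hp18 : p = 18 :=
      (by decide : ∀ p, p < kc7.length → kc7.drop p <+: kc6 → p = 18) p hp h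
    subst hp18
    rw [show kc7.drop 18 = "at".toList from by decide,
        show kc6 = "at".toList ++ " this point in time".toList from by decide] at hcontra
    have h6 := (List.prefix_append_right_inj ("at".toList)).mp hcontra
    have h5 := no_create kc5 vand _ (by decide) (by decide) (by decide) _ h6
    have h4 := no_create kc4 vto _ (by decide) (by decide) (by decide) _ h5
    have h0 := peel_p3 _ (by decide) (by decide) rest h4
    apply hnt
    rw [show "due to the fact that this point in time".toList
          = kc7 ++ " this point in time".toList from by decide]
    exact (List.prefix_append_right_inj kc7).mpr h0

-- pushing the replacement "and" past pass 7
theorem H57 (rest : List Char)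
    (hA : ¬ ("as well asue to the fact that".toList <+: kc5 ++ rest))
    (hB : ¬ ("as well asue in order to the fact that".toList <+: kc5 ++ rest))
    (hC : ¬ ("as well asue in order to the fact thain order to".toList <+: kc5 ++ rest))
    (hD : ¬ ("as well asue to the fact thain order to".toList <+: kc5 ++ rest)) :
    ∀ p, p < vand.length → ¬ kc7 <+:
      (vand.drop p ++ repl kc6 vnow (repl kc5 vand (repl kc4 vto (repl kc3 vplease
        (repl kc2 vplease (repl kc1 vplease rest)))))) := by
  intro p hp hcontra
  rcases prefX hcontra with h | h
  · exact (by decide : ∀ p, p < vand.length → ¬ kc7 <+: vand.drop p) p hp h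
  · have hp2 : p = 2 :=
      (by decide : ∀ p, p < vand.length → vand.drop p <+: kc7 → p = 2) p hp h
    subst hp2
    rw [show vand.drop 2 = ['d'] from by decide,
        show kc7 = ['d'] ++ "ue to the fact that".toList from by decide] at hcontra
    have h6 := (List.prefix_append_right_inj ['d']).mp hcontra
    have h5 := no_create kc6 vnow _ (by decide) (by decide) (by decide) _ h6
    have h4 := no_create kc5 vand _ (by decide) (by decide) (by decide) _ h5
    rcases peel_w7 rest h4 with h0 | h0 | h0 | h0
    · apply hA
      rw [show "as well asue to the fact that".toList
            = kc5 ++ "ue to the fact that".toList from by decide]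
      exact (List.prefix_append_right_inj kc5).mpr h0
    · apply hB
      rw [show "as well asue in order to the fact that".toList
            = kc5 ++ "ue in order to the fact that".toList from by decide]
      exact (List.prefix_append_right_inj kc5).mpr h0
    · apply hC
      rw [show "as well asue in order to the fact thain order to".toList
            = kc5 ++ "ue in order to the fact thain order to".toList from by decide]
      exact (List.prefix_append_right_inj kc5).mpr h0
    · apply hD
      rw [show "as well asue to the fact thain order to".toList
            = kc5 ++ "ue to the fact thain order to".toList from by decide]
      exact (List.prefix_append_right_inj kc5).mpr h0

-- head-preservation in the no-match case, pass by pass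
theorem headN2 (c : Char) (t : List Char) (hnp : ¬ kc2 <+: (c :: t)) :
    ¬ kc2 <+: (c :: repl kc1 vplease t) := by
  intro h
  rw [show kc2 = 'i' :: " would like you to".toList from by decide] at h hnp
  rcases List.cons_prefix_cons.mp h with ⟨rfl, htail⟩
  exact hnp (List.cons_prefix_cons.mpr
    ⟨rfl, no_create kc1 vplease _ (by decide) (by decide) (by decide) t htail⟩)

theorem headN3 (c : Char) (t : List Char) (hnp : ¬ kc3 <+: (c :: t))
    (hT1 : ¬ ("can you please could you".toList <+: (c :: t)))
    (hT2 : ¬ ("can you i would like you to".toList <+: (c :: t))) :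
    ¬ kc3 <+: (c :: repl kc2 vplease (repl kc1 vplease t)) := by
  intro h
  rw [show kc3 = 'c' :: "an you please".toList from by decide] at h
  rcases List.cons_prefix_cons.mp h with ⟨rfl, h2⟩
  have down1 : ¬ ("an you please".toList <+: repl kc1 vplease t) := by
    intro h1
    rcases semi_create kc1 vplease "an you please".toList (by decide) _ h1 with
      hlit | ⟨j, hj, hpre, hcase⟩
    · exact hnp (by
        rw [show kc3 = 'c' :: "an you please".toList from by decide]
        exact List.cons_prefix_cons.mpr ⟨rfl, hlit⟩)
    · have hj' : j < 13 := by simpa using hj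
      interval_cases j
      all_goals try (rcases hcase with hc | ⟨hc, -⟩ <;> exact absurd hc (by decide))
      -- j = 7
      · apply hT1
        rw [show "can you please could you".toList
              = 'c' :: ("an you please".toList.take 7 ++ kc1) from by decide]
        exact List.cons_prefix_cons.mpr ⟨rfl, hpre⟩
  rcases semi_create kc2 vplease "an you please".toList (by decide) _ h2 with
    hlit | ⟨j, hj, hpre, hcase⟩
  · exact down1 hlit
  · have hj' : j < 13 := by simpa using hj
    interval_cases j
    all_goals try (rcases hcase with hc | ⟨hc, -⟩ <;> exact absurd hc (by decide))
    -- j = 7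
    · have h0 := no_create kc1 vplease _ (by decide) (by decide) (by decide) t hpre
      apply hT2
      rw [show "can you i would like you to".toList
            = 'c' :: ("an you please".toList.take 7 ++ kc2) from by decide]
      exact List.cons_prefix_cons.mpr ⟨rfl, h0⟩

theorem headN4 (c : Char) (t : List Char) (hnp : ¬ kc4 <+: (c :: t)) :
    ¬ kc4 <+: (c :: repl kc3 vplease (repl kc2 vplease (repl kc1 vplease t))) := by
  intro h
  rw [show kc4 = 'i' :: "n order to".toList from by decide] at h hnp
  rcases List.cons_prefix_cons.mp h with ⟨rfl, htail⟩
  exact hnp (List.cons_prefix_cons.mpr ⟨rfl, peel_p3 _ (by decide) (by decide) t htail⟩)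

theorem headN5 (c : Char) (t : List Char) (hnp : ¬ kc5 <+: (c :: t)) :
    ¬ kc5 <+: (c :: repl kc4 vto (repl kc3 vplease (repl kc2 vplease (repl kc1 vplease t)))) := by
  intro h
  rw [show kc5 = 'a' :: "s well as".toList from by decide] at h hnp
  rcases List.cons_prefix_cons.mp h with ⟨rfl, htail⟩
  have h0 := no_create kc4 vto _ (by decide) (by decide) (by decide) _ htail
  exact hnp (List.cons_prefix_cons.mpr ⟨rfl, peel_p3 _ (by decide) (by decide) t h0⟩)

theorem headN6 (c : Char) (t : List Char) (hnp : ¬ kc6 <+: (c :: t)) :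
    ¬ kc6 <+: (c :: repl kc5 vand (repl kc4 vto (repl kc3 vplease
      (repl kc2 vplease (repl kc1 vplease t))))) := by
  intro h
  rw [show kc6 = 'a' :: "t this point in time".toList from by decide] at h hnp
  rcases List.cons_prefix_cons.mp h with ⟨rfl, htail⟩
  have h5 := no_create kc5 vand _ (by decide) (by decide) (by decide) _ htail
  have h4 := no_create kc4 vto _ (by decide) (by decide) (by decide) _ h5
  exact hnp (List.cons_prefix_cons.mpr ⟨rfl, peel_p3 _ (by decide) (by decide) t h4⟩)

theorem headN7 (c : Char) (t : List Char) (hnp : ¬ kc7 <+: (c :: t))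
    (hTa : ¬ ("due in order to the fact that".toList <+: (c :: t)))
    (hTb : ¬ ("due in order to the fact thain order to".toList <+: (c :: t)))
    (hTc : ¬ ("due to the fact thain order to".toList <+: (c :: t))) :
    ¬ kc7 <+: (c :: repl kc6 vnow (repl kc5 vand (repl kc4 vto (repl kc3 vplease
      (repl kc2 vplease (repl kc1 vplease t)))))) := by
  intro h
  rw [show kc7 = 'd' :: "ue to the fact that".toList from by decide] at h hnp
  rcases List.cons_prefix_cons.mp h with ⟨rfl, h6⟩
  have h5 := no_create kc6 vnow _ (by decide) (by decide) (by decide) _ h6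
  have h4 := no_create kc5 vand _ (by decide) (by decide) (by decide) _ h5
  rcases peel_w7 t h4 with h0 | h0 | h0 | h0
  · exact hnp (List.cons_prefix_cons.mpr ⟨rfl, h0⟩)
  · exact hTa (by
      rw [show "due in order to the fact that".toList
            = 'd' :: "ue in order to the fact that".toList from by decide]
      exact List.cons_prefix_cons.mpr ⟨rfl, h0⟩)
  · exact hTb (by
      rw [show "due in order to the fact thain order to".toList
            = 'd' :: "ue in order to the fact thain order to".toList from by decide]
      exact List.cons_prefix_cons.mpr ⟨rfl, h0⟩)
  · exact hTc (by
      rw [show "due to the fact thain order to".toList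
            = 'd' :: "ue to the fact thain order to".toList from by decide]
      exact List.cons_prefix_cons.mpr ⟨rfl, h0⟩)

theorem isPrefixOf_false {a l : List Char} (h : ¬ a <+: l) : a.isPrefixOf l = false := by
  rw [Bool.eq_false_iff]; intro hc; exact h (List.isPrefixOf_iff_prefix.mp hc)

theorem isPrefixOf_true {a l : List Char} (h : a <+: l) : a.isPrefixOf l = true :=
  List.isPrefixOf_iff_prefix.mpr h

theorem findRuleB_cons (k v : String) (rs : List (String × String)) (l : List Char) :
    findRuleB ((k, v) :: rs) l =
      if k.toList.isPrefixOf l then some (v, k.toList.length) else findRuleB rs l := rfl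

theorem main_scan : ∀ s : List Char, NT s → comp s = scanB s := by
  intro s
  induction hn : s.length using Nat.strong_induction_on generalizing s with
  | _ n ih =>
  subst hn
  intro hNT
  match s with
  | [] => simp [comp, repl_nil]; rfl
  | c :: t =>
    have IH : ∀ u : List Char, u.length < (c :: t).length → NT u → comp u = scanB u :=
      fun u hu hnt => ih u.length (by simpa using hu) u rfl hnt
    have hNTt : NT t := fun tg htg hin => hNT tg htg (hin.trans (List.suffix_cons c t).isInfix)
    have hTr : ∀ tg : String, tg ∈ cascadeTriggers → ¬ (tg.toList <+: (c :: t)) :=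
      fun tg htg hp => hNT tg.toList (List.mem_map_of_mem htg) hp.isInfix
    by_cases hp1 : kc1 <+: (c :: t)
    · obtain ⟨rest, hR⟩ := hp1
      have hNTrest : NT rest := fun tg htg hin => hNT tg htg
        (hin.trans (by rw [← hR]; exact (List.suffix_append kc1 rest).isInfix))
      have hlen : rest.length < (c :: t).length := by
        rw [← hR]; simp [show 0 < kc1.length from by decide]
      have hf : findRuleB rulesB (c :: t) = some ("please", 16) := by
        have b1 : ("please could you".toList.isPrefixOf (c :: t)) = true := isPrefixOf_true ⟨rest, hR⟩
        simp only [rulesB, brevityMap, findRuleB_cons, b1]; simp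
      have hdrop : (c :: t).drop 16 = rest := by
        rw [← hR, show (16 : Nat) = kc1.length from by decide, List.drop_left]
      have e : comp (c :: t) = vplease ++ comp rest := by
        rw [← hR]; unfold comp
        rw [repl_match kc1 vplease _ (by decide) (List.prefix_append _ _), List.drop_left,
            push_safe kc2 vplease vplease (by decide), push_safe kc3 vplease vplease (by decide),
            push_safe kc4 vto vplease (by decide), push_safe kc5 vand vplease (by decide),
            push_safe kc6 vnow vplease (by decide), push_safe kc7 vbecause vplease (by decide)]
      rw [e, scanB_cons_rule c t "please" 16 hf, hdrop, IH rest hlen hNTrest]; rfl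
    by_cases hp2 : kc2 <+: (c :: t)
    · obtain ⟨rest, hR⟩ := hp2
      have hNTrest : NT rest := fun tg htg hin => hNT tg htg
        (hin.trans (by rw [← hR]; exact (List.suffix_append kc2 rest).isInfix))
      have hlen : rest.length < (c :: t).length := by
        rw [← hR]; simp [show 0 < kc2.length from by decide]
      have hf : findRuleB rulesB (c :: t) = some ("please", 19) := by
        have b1 : ("please could you".toList.isPrefixOf (c :: t)) = false := isPrefixOf_false hp1
        have b2 : ("i would like you to".toList.isPrefixOf (c :: t)) = true := isPrefixOf_true ⟨rest, hR⟩
        simp only [rulesB, brevityMap, findRuleB_cons, b1, b2]; simp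
      have hdrop : (c :: t).drop 19 = rest := by
        rw [← hR, show (19 : Nat) = kc2.length from by decide, List.drop_left]
      have e : comp (c :: t) = vplease ++ comp rest := by
        rw [← hR]; unfold comp
        rw [push_safe kc1 vplease kc2 (by decide),
            repl_match kc2 vplease _ (by decide) (List.prefix_append _ _), List.drop_left,
            push_safe kc3 vplease vplease (by decide), push_safe kc4 vto vplease (by decide),
            push_safe kc5 vand vplease (by decide), push_safe kc6 vnow vplease (by decide),
            push_safe kc7 vbecause vplease (by decide)]
      rw [e, scanB_cons_rule c t "please" 19 hf, hdrop, IH rest hlen hNTrest]; rfl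
    by_cases hp3 : kc3 <+: (c :: t)
    · obtain ⟨rest, hR⟩ := hp3
      have hNTrest : NT rest := fun tg htg hin => hNT tg htg
        (hin.trans (by rw [← hR]; exact (List.suffix_append kc3 rest).isInfix))
      have hlen : rest.length < (c :: t).length := by
        rw [← hR]; simp [show 0 < kc3.length from by decide]
      have hf : findRuleB rulesB (c :: t) = some ("please", 14) := by
        have b1 : ("please could you".toList.isPrefixOf (c :: t)) = false := isPrefixOf_false hp1
        have b2 : ("i would like you to".toList.isPrefixOf (c :: t)) = false := isPrefixOf_false hp2
        have b3 : ("can you please".toList.isPrefixOf (c :: t)) = true := isPrefixOf_true ⟨rest, hR⟩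
        simp only [rulesB, brevityMap, findRuleB_cons, b1, b2, b3]; simp
      have hdrop : (c :: t).drop 14 = rest := by
        rw [← hR, show (14 : Nat) = kc3.length from by decide, List.drop_left]
      have hT1 : ¬ ("can you please could you".toList <+: kc3 ++ rest) := by
        rw [hR]; exact hTr "can you please could you" (by decide)
      have e : comp (c :: t) = vplease ++ comp rest := by
        rw [← hR]; unfold comp
        rw [repl_push kc1 vplease kc3 rest (H31 rest hT1),
            push_safe kc2 vplease kc3 (by decide),
            repl_match kc3 vplease _ (by decide) (List.prefix_append _ _), List.drop_left,
            push_safe kc4 vto vplease (by decide), push_safe kc5 vand vplease (by decide),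
            push_safe kc6 vnow vplease (by decide), push_safe kc7 vbecause vplease (by decide)]
      rw [e, scanB_cons_rule c t "please" 14 hf, hdrop, IH rest hlen hNTrest]; rfl
    by_cases hp4 : kc4 <+: (c :: t)
    · obtain ⟨rest, hR⟩ := hp4
      have hNTrest : NT rest := fun tg htg hin => hNT tg htg
        (hin.trans (by rw [← hR]; exact (List.suffix_append kc4 rest).isInfix))
      have hlen : rest.length < (c :: t).length := by
        rw [← hR]; simp [show 0 < kc4.length from by decide]
      have hf : findRuleB rulesB (c :: t) = some ("to", 11) := by
        have b1 : ("please could you".toList.isPrefixOf (c :: t)) = false := isPrefixOf_false hp1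
        have b2 : ("i would like you to".toList.isPrefixOf (c :: t)) = false := isPrefixOf_false hp2
        have b3 : ("can you please".toList.isPrefixOf (c :: t)) = false := isPrefixOf_false hp3
        have b4 : ("in order to".toList.isPrefixOf (c :: t)) = true := isPrefixOf_true ⟨rest, hR⟩
        simp only [rulesB, brevityMap, findRuleB_cons, b1, b2, b3, b4]; simp
      have hdrop : (c :: t).drop 11 = rest := by
        rw [← hR, show (11 : Nat) = kc4.length from by decide, List.drop_left]
      have e : comp (c :: t) = vto ++ comp rest := by
        rw [← hR]; unfold comp
        rw [push_safe kc1 vplease kc4 (by decide), push_safe kc2 vplease kc4 (by decide),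
            push_safe kc3 vplease kc4 (by decide),
            repl_match kc4 vto _ (by decide) (List.prefix_append _ _), List.drop_left,
            push_safe kc5 vand vto (by decide), push_safe kc6 vnow vto (by decide),
            push_safe kc7 vbecause vto (by decide)]
      rw [e, scanB_cons_rule c t "to" 11 hf, hdrop, IH rest hlen hNTrest]; rfl
    by_cases hp5 : kc5 <+: (c :: t)
    · obtain ⟨rest, hR⟩ := hp5
      have hNTrest : NT rest := fun tg htg hin => hNT tg htg
        (hin.trans (by rw [← hR]; exact (List.suffix_append kc5 rest).isInfix))
      have hlen : rest.length < (c :: t).length := by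
        rw [← hR]; simp [show 0 < kc5.length from by decide]
      have hf : findRuleB rulesB (c :: t) = some ("and", 10) := by
        have b1 : ("please could you".toList.isPrefixOf (c :: t)) = false := isPrefixOf_false hp1
        have b2 : ("i would like you to".toList.isPrefixOf (c :: t)) = false := isPrefixOf_false hp2
        have b3 : ("can you please".toList.isPrefixOf (c :: t)) = false := isPrefixOf_false hp3
        have b4 : ("in order to".toList.isPrefixOf (c :: t)) = false := isPrefixOf_false hp4
        have b5 : ("as well as".toList.isPrefixOf (c :: t)) = true := isPrefixOf_true ⟨rest, hR⟩
        simp only [rulesB, brevityMap, findRuleB_cons, b1, b2, b3, b4, b5]; simp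
      have hdrop : (c :: t).drop 10 = rest := by
        rw [← hR, show (10 : Nat) = kc5.length from by decide, List.drop_left]
      have hA : ¬ ("as well asue to the fact that".toList <+: kc5 ++ rest) := by
        rw [hR]; exact hTr "as well asue to the fact that" (by decide)
      have hB : ¬ ("as well asue in order to the fact that".toList <+: kc5 ++ rest) := by
        rw [hR]; exact hTr "as well asue in order to the fact that" (by decide)
      have hC : ¬ ("as well asue in order to the fact thain order to".toList <+: kc5 ++ rest) := by
        rw [hR]; exact hTr "as well asue in order to the fact thain order to" (by decide)
      have hD : ¬ ("as well asue to the fact thain order to".toList <+: kc5 ++ rest) := by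
        rw [hR]; exact hTr "as well asue to the fact thain order to" (by decide)
      have e : comp (c :: t) = vand ++ comp rest := by
        rw [← hR]; unfold comp
        rw [push_safe kc1 vplease kc5 (by decide), push_safe kc2 vplease kc5 (by decide),
            push_safe kc3 vplease kc5 (by decide), push_safe kc4 vto kc5 (by decide),
            repl_match kc5 vand _ (by decide) (List.prefix_append _ _), List.drop_left,
            push_safe kc6 vnow vand (by decide),
            repl_push kc7 vbecause vand _ (H57 rest hA hB hC hD)]
      rw [e, scanB_cons_rule c t "and" 10 hf, hdrop, IH rest hlen hNTrest]; rfl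
    by_cases hp6 : kc6 <+: (c :: t)
    · obtain ⟨rest, hR⟩ := hp6
      have hNTrest : NT rest := fun tg htg hin => hNT tg htg
        (hin.trans (by rw [← hR]; exact (List.suffix_append kc6 rest).isInfix))
      have hlen : rest.length < (c :: t).length := by
        rw [← hR]; simp [show 0 < kc6.length from by decide]
      have hf : findRuleB rulesB (c :: t) = some ("now", 21) := by
        have b1 : ("please could you".toList.isPrefixOf (c :: t)) = false := isPrefixOf_false hp1
        have b2 : ("i would like you to".toList.isPrefixOf (c :: t)) = false := isPrefixOf_false hp2
        have b3 : ("can you please".toList.isPrefixOf (c :: t)) = false := isPrefixOf_false hp3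
        have b4 : ("in order to".toList.isPrefixOf (c :: t)) = false := isPrefixOf_false hp4
        have b5 : ("as well as".toList.isPrefixOf (c :: t)) = false := isPrefixOf_false hp5
        have b6 : ("at this point in time".toList.isPrefixOf (c :: t)) = true := isPrefixOf_true ⟨rest, hR⟩
        simp only [rulesB, brevityMap, findRuleB_cons, b1, b2, b3, b4, b5, b6]; simp
      have hdrop : (c :: t).drop 21 = rest := by
        rw [← hR, show (21 : Nat) = kc6.length from by decide, List.drop_left]
      have e : comp (c :: t) = vnow ++ comp rest := by
        rw [← hR]; unfold comp
        rw [push_safe kc1 vplease kc6 (by decide), push_safe kc2 vplease kc6 (by decide),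
            push_safe kc3 vplease kc6 (by decide), push_safe kc4 vto kc6 (by decide),
            push_safe kc5 vand kc6 (by decide),
            repl_match kc6 vnow _ (by decide) (List.prefix_append _ _), List.drop_left,
            push_safe kc7 vbecause vnow (by decide)]
      rw [e, scanB_cons_rule c t "now" 21 hf, hdrop, IH rest hlen hNTrest]; rfl
    by_cases hp7 : kc7 <+: (c :: t)
    · obtain ⟨rest, hR⟩ := hp7
      have hNTrest : NT rest := fun tg htg hin => hNT tg htg
        (hin.trans (by rw [← hR]; exact (List.suffix_append kc7 rest).isInfix))
      have hlen : rest.length < (c :: t).length := by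
        rw [← hR]; simp [show 0 < kc7.length from by decide]
      have hf : findRuleB rulesB (c :: t) = some ("because", 20) := by
        have b1 : ("please could you".toList.isPrefixOf (c :: t)) = false := isPrefixOf_false hp1
        have b2 : ("i would like you to".toList.isPrefixOf (c :: t)) = false := isPrefixOf_false hp2
        have b3 : ("can you please".toList.isPrefixOf (c :: t)) = false := isPrefixOf_false hp3
        have b4 : ("in order to".toList.isPrefixOf (c :: t)) = false := isPrefixOf_false hp4
        have b5 : ("as well as".toList.isPrefixOf (c :: t)) = false := isPrefixOf_false hp5
        have b6 : ("at this point in time".toList.isPrefixOf (c :: t)) = false := isPrefixOf_false hp6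
        have b7 : ("due to the fact that".toList.isPrefixOf (c :: t)) = true := isPrefixOf_true ⟨rest, hR⟩
        simp only [rulesB, brevityMap, findRuleB_cons, b1, b2, b3, b4, b5, b6, b7]; simp
      have hdrop : (c :: t).drop 20 = rest := by
        rw [← hR, show (20 : Nat) = kc7.length from by decide, List.drop_left]
      have hOv : ¬ ("due to the fact that this point in time".toList <+: kc7 ++ rest) := by
        rw [hR]; exact hTr "due to the fact that this point in time" (by decide)
      have e : comp (c :: t) = vbecause ++ comp rest := by
        rw [← hR]; unfold comp
        rw [push_safe kc1 vplease kc7 (by decide), push_safe kc2 vplease kc7 (by decide),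
            push_safe kc3 vplease kc7 (by decide), push_safe kc4 vto kc7 (by decide),
            push_safe kc5 vand kc7 (by decide),
            repl_push kc6 vnow kc7 _ (H76 rest hOv),
            repl_match kc7 vbecause _ (by decide) (List.prefix_append _ _), List.drop_left]
      rw [e, scanB_cons_rule c t "because" 20 hf, hdrop, IH rest hlen hNTrest]; rfl
    -- no rule matches at the head: every pass copies c
    · have hfN : findRuleB rulesB (c :: t) = none := by
        have b1 : ("please could you".toList.isPrefixOf (c :: t)) = false := isPrefixOf_false hp1
        have b2 : ("i would like you to".toList.isPrefixOf (c :: t)) = false := isPrefixOf_false hp2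
        have b3 : ("can you please".toList.isPrefixOf (c :: t)) = false := isPrefixOf_false hp3
        have b4 : ("in order to".toList.isPrefixOf (c :: t)) = false := isPrefixOf_false hp4
        have b5 : ("as well as".toList.isPrefixOf (c :: t)) = false := isPrefixOf_false hp5
        have b6 : ("at this point in time".toList.isPrefixOf (c :: t)) = false := isPrefixOf_false hp6
        have b7 : ("due to the fact that".toList.isPrefixOf (c :: t)) = false := isPrefixOf_false hp7
        simp only [rulesB, brevityMap, findRuleB_cons, b1, b2, b3, b4, b5, b6, b7]
        simp [findRuleB]
      have hcopy : comp (c :: t) = c :: comp t := by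
        unfold comp
        rw [repl_copy kc1 vplease c t hp1,
            repl_copy kc2 vplease c _ (headN2 c t hp2),
            repl_copy kc3 vplease c _ (headN3 c t hp3
              (hTr "can you please could you" (by decide))
              (hTr "can you i would like you to" (by decide))),
            repl_copy kc4 vto c _ (headN4 c t hp4),
            repl_copy kc5 vand c _ (headN5 c t hp5),
            repl_copy kc6 vnow c _ (headN6 c t hp6),
            repl_copy kc7 vbecause c _ (headN7 c t hp7
              (hTr "due in order to the fact that" (by decide))
              (hTr "due in order to the fact thain order to" (by decide))
              (hTr "due to the fact thain order to" (by decide)))]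
      rw [hcopy, scanB_cons_none c t hfN, IH t (by simp) hNTt]

-- ===== VERDICT (by name: the statement is the Claim_ definition above) =====
theorem replace_eq1 (l : List Char) :
    PySem.Chars.replace l "please could you".toList "please".toList = repl kc1 vplease l :=
  replace_eq _ _ _ (by decide)
theorem replace_eq2 (l : List Char) :
    PySem.Chars.replace l "i would like you to".toList "please".toList = repl kc2 vplease l :=
  replace_eq _ _ _ (by decide)
theorem replace_eq3 (l : List Char) :
    PySem.Chars.replace l "can you please".toList "please".toList = repl kc3 vplease l :=
  replace_eq _ _ _ (by decide)
theorem replace_eq4 (l : List Char) :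
    PySem.Chars.replace l "in order to".toList "to".toList = repl kc4 vto l :=
  replace_eq _ _ _ (by decide)
theorem replace_eq5 (l : List Char) :
    PySem.Chars.replace l "as well as".toList "and".toList = repl kc5 vand l :=
  replace_eq _ _ _ (by decide)
theorem replace_eq6 (l : List Char) :
    PySem.Chars.replace l "at this point in time".toList "now".toList = repl kc6 vnow l :=
  replace_eq _ _ _ (by decide)
theorem replace_eq7 (l : List Char) :
    PySem.Chars.replace l "due to the fact that".toList "because".toList = repl kc7 vbecause l :=
  replace_eq _ _ _ (by decide)

set_option maxRecDepth 40000 in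
theorem optimize_brevity_py_spec : Claim_equal_optimize_brevity_py := by
  intro prompt context _ hpre
  unfold Spec_optimize_brevity_py
  have hNT : NT (PySem.Str.lower prompt).toList := by
    intro tg htg hin
    rcases List.mem_map.mp htg with ⟨t0, ht0, rfl⟩
    have hmem : t0 ∈ ["can you please could you", "can you i would like you to", "due to the fact that this point in time", "due in order to the fact that", "due to the fact thain order to", "due in order to the fact thain order to", "as well asue to the fact that", "as well asue in order to the fact that", "as well asue to the fact thain order to", "as well asue in order to the fact thain order to"] := by
      rw [show ["can you please could you", "can you i would like you to", "due to the fact that this point in time", "due in order to the fact that", "due to the fact thain order to", "due in order to the fact thain order to", "as well asue to the fact that", "as well asue in order to the fact that", "as well asue to the fact thain order to", "as well asue in order to the fact thain order to"] = cascadeTriggers from rfl]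
      exact ht0
    exact hpre t0 hmem (by rw [PySem.Str.toList_lower] at hin; exact hin)
  have hopt : brevityMap.foldl (fun s p => PySem.Str.replace s p.1 p.2) (PySem.Str.lower prompt)
      = String.ofList (scanB (PySem.Str.lower prompt).toList) := by
    apply String.toList_inj.mp
    simp only [brevityMap, List.foldl]
    simp only [PySem.Str.toList_replace, String.toList_ofList]
    simp only [replace_eq1, replace_eq2, replace_eq3, replace_eq4, replace_eq5,
               replace_eq6, replace_eq7]
    exact main_scan _ hNT
  simp only [optimize_brevity_py, optimize_brevity_py_alt]
  rw [hopt]
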